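-- pv_equiv track=rewrite | github.com/KingVentrix007/The-Greater-Internet-Project | scripts/time_analyse.py | auto_split_sections
-- ===== SOURCE A (Python) =====
-- def auto_split_sections(lines):
--     sections = []
--     current_section = []
--
--     prev_type = None
--     for line in lines:
--         parts = line.strip().split(":")
--         if len(parts) != 3:
--             continue
--
--         packet_type = parts[1].strip()
--
--         if prev_type is not None and packet_type != prev_type:
--             # Type changed – split section
--             if current_section:
--                 sections.append(current_section)
--                 current_section = []
--
--         current_section.append(line.strip())
--         prev_type = packet_type
--
--     if current_section:
--         sections.append(current_section)
--
--     return sections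
-- ===== SOURCE B (Python) =====
-- def auto_split_sections(lines):
--     # Pass 1: parse and filter, keeping (packet_type, stripped_line) pairs.
--     parsed = []
--     for line in lines:
--         s = line.strip()
--         parts = s.split(":")
--         if len(parts) == 3:
--             parsed.append((parts[1].strip(), s))
--     # Pass 2: cut the parsed list into maximal runs of equal packet type.
--     sections = []
--     i = 0
--     n = len(parsed)
--     while i < n:
--         t = parsed[i][0]
--         j = i
--         while j < n and parsed[j][0] == t:
--             j += 1
--         sections.append([s for _, s in parsed[i:j]])
--         i = j
--     return sections
-- ===== Notes on version B (the rewrite author's own statement) =====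
-- stated objective: alternative
-- what changed: Replaces the single-pass prev_type/current_section flush state machine with a parse-and-filter pass producing (type, line) pairs followed by a separate run-extraction pass that slices out maximal runs of equal packet type.
import Mathlib
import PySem

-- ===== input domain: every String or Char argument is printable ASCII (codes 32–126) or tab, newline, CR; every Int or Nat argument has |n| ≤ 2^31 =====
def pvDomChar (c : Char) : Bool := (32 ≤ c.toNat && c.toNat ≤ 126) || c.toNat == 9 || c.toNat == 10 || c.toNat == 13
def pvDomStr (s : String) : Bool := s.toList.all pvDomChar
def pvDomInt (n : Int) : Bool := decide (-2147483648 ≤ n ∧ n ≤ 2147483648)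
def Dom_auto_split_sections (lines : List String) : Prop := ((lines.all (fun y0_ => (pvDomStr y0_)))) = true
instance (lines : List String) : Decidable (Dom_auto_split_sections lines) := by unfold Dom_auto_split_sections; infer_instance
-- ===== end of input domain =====

-- B replaces A's single-pass prev_type/current_section flush state machine by a parse-and-filter
-- pass followed by a separate run-extraction pass over the parsed pairs (objective: alternative).

-- ===== PORT A =====
-- s.split(":") for both ports: exact since the separator ":" is nonempty (split? is `some` there)
def pvSplitColon (s : String) : List String := (PySem.Str.split? s ":").getD []

-- state: (sections, current_section, prev_type); one fold step per line, branches in A's order.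
def auto_split_sections (lines : List String) : List (List String) :=
  let st :=
    lines.foldl
      (fun (st : List (List String) × List String × Option String) line =>
        let parts := pvSplitColon (PySem.Str.strip line)
        if parts.length ≠ 3 then st
        else
          let packet_type := PySem.Str.strip (parts.getD 1 "")  -- parts[1]: in range since length = 3
          let st :=
            if st.2.2.isSome ∧ some packet_type ≠ st.2.2 then
              if st.2.1 ≠ [] then (st.1 ++ [st.2.1], [], st.2.2) else st
            else st
          (st.1, st.2.1 ++ [PySem.Str.strip line], some packet_type))
      ([], [], none)
  if st.2.1 ≠ [] then st.1 ++ [st.2.1] else st.1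

-- ===== PORT B =====
-- pass 1 of Source B: parse each line, keep (packet_type, stripped_line) when it splits into 3 parts
def pvParse (lines : List String) : List (String × String) :=
  lines.foldl
    (fun acc line =>
      let s := PySem.Str.strip line
      let parts := pvSplitColon s
      if parts.length == 3 then acc ++ [(PySem.Str.strip (parts.getD 1 ""), s)] else acc)
    []

-- pass 2 of Source B: the index-advancing while loops cut the parsed list into maximal runs of
-- equal packet type; takeWhile/dropWhile is that inner 'advance j while key equal' + slice.
def pvRuns : List (String × String) → List (List String)
  | [] => []
  | (t, s) :: rest =>
    (s :: (rest.takeWhile (fun p => p.1 == t)).map Prod.snd)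
      :: pvRuns (rest.dropWhile (fun p => p.1 == t))
  termination_by l => l.length
  decreasing_by
    simp only [List.length_cons]
    exact Nat.lt_succ_of_le (List.length_dropWhile_le _ _)

def auto_split_sections_alt (lines : List String) : List (List String) :=
  pvRuns (pvParse lines)

-- ===== PRECONDITION & SPEC =====
def Spec_auto_split_sections (lines : List String) (out : List (List String)) : Prop := out = auto_split_sections_alt lines
instance (lines : List String) (out : List (List String)) : Decidable (Spec_auto_split_sections lines out) := by unfold Spec_auto_split_sections; infer_instance

-- ===== CLAIM (what is proved, stated in full; the proofs are below) =====
def Claim_equal_auto_split_sections : Prop := ∀ (lines : List String), Dom_auto_split_sections lines → Spec_auto_split_sections lines (auto_split_sections lines)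

-- ===== LEMMAS AND PROOFS =====

-- A's step specialised to an already-parsed pair (t, s)
def pvStepP (st : List (List String) × List String × Option String) (p : String × String) :
    List (List String) × List String × Option String :=
  let st' :=
    if st.2.2.isSome ∧ some p.1 ≠ st.2.2 then
      if st.2.1 ≠ [] then (st.1 ++ [st.2.1], [], st.2.2) else st
    else st
  (st'.1, st'.2.1 ++ [p.2], some p.1)

def pvFinish (st : List (List String) × List String × Option String) : List (List String) :=
  if st.2.1 ≠ [] then st.1 ++ [st.2.1] else st.1

-- B's run extraction with a pending run (cur, t) already open
def pvRunsFrom (t : String) (cur : List String) : List (String × String) → List (List String)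
  | [] => [cur]
  | (t', s) :: rest =>
    if t' = t then pvRunsFrom t (cur ++ [s]) rest
    else cur :: pvRunsFrom t' [s] rest
  termination_by l => l.length

theorem pvRuns_eq_from (t s : String) (l : List (String × String)) :
    pvRuns ((t, s) :: l) = pvRunsFrom t [s] l := by
  suffices h : ∀ n (l : List (String × String)), l.length ≤ n → ∀ t cur s,
      ((cur ++ [s]) ++ (l.takeWhile (fun p => p.1 == t)).map Prod.snd)
        :: pvRuns (l.dropWhile (fun p => p.1 == t)) = pvRunsFrom t (cur ++ [s]) l by
    have := h l.length l le_rfl t [] s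
    simpa [pvRuns] using this
  intro n
  induction n with
  | zero =>
    intro l hl t cur s
    have : l = [] := List.length_eq_zero_iff.mp (Nat.le_zero.mp hl)
    subst this
    simp [pvRuns, pvRunsFrom]
  | succ n ih =>
    intro l hl t cur s
    cases l with
    | nil => simp [pvRuns, pvRunsFrom]
    | cons p rest =>
      obtain ⟨t', s'⟩ := p
      by_cases ht : t' = t
      · subst ht
        have hrest := ih rest (Nat.le_of_succ_le_succ hl) t' (cur ++ [s]) s'
        simpa [pvRunsFrom, List.takeWhile_cons, List.dropWhile_cons, List.append_assoc] using hrest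
      · have hbe : (t' == t) = false := beq_false_of_ne ht
        have hrest := ih rest (Nat.le_of_succ_le_succ hl) t' [] s'
        simp only [pvRunsFrom, if_neg ht, List.takeWhile_cons, List.dropWhile_cons, hbe,
          Bool.false_eq_true, if_false, List.nil_append] at *
        rw [← hrest]
        simp [pvRuns]

-- A's fold over parsed pairs, once a run (t, cur ≠ []) is open, produces B's runs
theorem pvFoldP_runsFrom (l : List (String × String)) :
    ∀ (secs : List (List String)) (cur : List String) (t : String), cur ≠ [] →
      pvFinish (l.foldl pvStepP (secs, cur, some t)) = secs ++ pvRunsFrom t cur l := by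
  induction l with
  | nil => intro secs cur t hcur; simp [pvFinish, pvRunsFrom, if_pos hcur]
  | cons p rest ih =>
    intro secs cur t hcur
    obtain ⟨t', s'⟩ := p
    by_cases ht : t' = t
    · subst ht
      have : pvStepP (secs, cur, some t') (t', s') = (secs, cur ++ [s'], some t') := by
        simp [pvStepP]
      rw [List.foldl_cons, this, ih secs (cur ++ [s']) t' (by simp)]
      simp [pvRunsFrom]
    · have : pvStepP (secs, cur, some t) (t', s') = (secs ++ [cur], [s'], some t') := by
        simp [pvStepP, ht, hcur]
      rw [List.foldl_cons, this, ih (secs ++ [cur]) [s'] t' (by simp)]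
      simp [pvRunsFrom, if_neg ht]

-- structural form of the parse pass
def pvParseF : List String → List (String × String)
  | [] => []
  | line :: rest =>
    let s := PySem.Str.strip line
    let parts := pvSplitColon s
    if parts.length == 3 then (PySem.Str.strip (parts.getD 1 ""), s) :: pvParseF rest
    else pvParseF rest

theorem pvParse_eq_parseF (lines : List String) : pvParse lines = pvParseF lines := by
  suffices h : ∀ (acc : List (String × String)),
      lines.foldl
        (fun acc line =>
          let s := PySem.Str.strip line
          let parts := pvSplitColon s
          if parts.length == 3 then acc ++ [(PySem.Str.strip (parts.getD 1 ""), s)] else acc)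
        acc = acc ++ pvParseF lines by
    simpa [pvParse] using h []
  induction lines with
  | nil => intro acc; simp [pvParseF]
  | cons line rest ih =>
    intro acc
    simp only [List.foldl_cons, pvParseF]
    by_cases h : ((pvSplitColon (PySem.Str.strip line)).length == 3) = true
    · rw [if_pos h, if_pos h, ih, List.append_assoc, List.singleton_append]
    · rw [if_neg h, if_neg h, ih]

-- A's fold over the lines is pvStepP folded over the parsed pairs
theorem pvFold_lines_eq (lines : List String) (st : List (List String) × List String × Option String) :
    lines.foldl
      (fun (st : List (List String) × List String × Option String) line =>
        let parts := pvSplitColon (PySem.Str.strip line)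
        if parts.length ≠ 3 then st
        else
          let packet_type := PySem.Str.strip (parts.getD 1 "")
          let st :=
            if st.2.2.isSome ∧ some packet_type ≠ st.2.2 then
              if st.2.1 ≠ [] then (st.1 ++ [st.2.1], [], st.2.2) else st
            else st
          (st.1, st.2.1 ++ [PySem.Str.strip line], some packet_type)) st
    = (pvParseF lines).foldl pvStepP st := by
  induction lines generalizing st with
  | nil => simp [pvParseF]
  | cons line rest ih =>
    simp only [List.foldl_cons, pvParseF]
    by_cases h3 : (pvSplitColon (PySem.Str.strip line)).length = 3
    · simp only [h3, if_pos, beq_self_eq_true, ne_eq, not_true_eq_false, if_false,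
        List.foldl_cons]
      rw [ih]
      rfl
    · have : ((pvSplitColon (PySem.Str.strip line)).length == 3) = false := by
        simpa using h3
      simp only [ne_eq, h3, not_false_eq_true, if_true, this, Bool.false_eq_true, if_false]
      exact ih st

theorem auto_split_sections_spec : Claim_equal_auto_split_sections := by
  intro lines _
  unfold Spec_auto_split_sections auto_split_sections auto_split_sections_alt
  rw [pvParse_eq_parseF]
  show pvFinish (lines.foldl _ ([], [], none)) = pvRuns (pvParseF lines)
  rw [pvFold_lines_eq]
  cases h : pvParseF lines with
  | nil => simp [pvFinish, pvRuns]
  | cons p rest =>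
    obtain ⟨t, s⟩ := p
    rw [List.foldl_cons]
    have h1 : pvStepP ([], [], none) (t, s) = ([], [s], some t) := by simp [pvStepP]
    rw [h1, pvFoldP_runsFrom rest [] [s] t (by simp), pvRuns_eq_from]
    simp
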